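-- pv_equiv track=rewrite | github.com/krisio/programming_0 | week4/Winter-Is-Coming/winter.py | winter_is_coming
-- ===== SOURCE A (Python) =====
-- def winter_is_coming(seasons):
--
--     is_winter_coming = False
--
--     count = 0
--
--     for season in seasons:
--         if season != "winter":
--             count += 1
--         elif season == "winter":
--             count = 0
--         if count == 5:
--             is_winter_coming = True
--
--     return is_winter_coming
-- ===== SOURCE B (Python) =====
-- from itertools import groupby
--
-- def winter_is_coming(seasons):
--     return any(k and sum(1 for _ in g) >= 5
--                for k, g in groupby(seasons, key=lambda s: s != "winter"))
-- ===== Notes on version B (the rewrite author's own statement) =====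
-- stated objective: idiomatic
-- what changed: B segments the list into maximal non-winter runs with itertools.groupby and returns whether any run has length >= 5, instead of A's running counter plus sticky boolean flag.
import Mathlib
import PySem

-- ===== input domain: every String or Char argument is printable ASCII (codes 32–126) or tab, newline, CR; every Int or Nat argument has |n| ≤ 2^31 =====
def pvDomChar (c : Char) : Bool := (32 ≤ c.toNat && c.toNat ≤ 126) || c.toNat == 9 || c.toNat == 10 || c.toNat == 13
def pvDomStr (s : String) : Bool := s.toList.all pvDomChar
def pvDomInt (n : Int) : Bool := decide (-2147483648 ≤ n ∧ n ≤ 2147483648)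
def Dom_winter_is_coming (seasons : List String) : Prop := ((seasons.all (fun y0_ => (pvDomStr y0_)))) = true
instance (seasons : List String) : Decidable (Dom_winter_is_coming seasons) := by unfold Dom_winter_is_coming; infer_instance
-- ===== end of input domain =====

-- B groups the list into maximal non-winter runs and checks whether any run has length >= 5,
-- instead of A's running counter with a sticky boolean flag.

-- ===== PORT A =====
-- the for-loop of A: state is (is_winter_coming, count)
def winterLoopA : List String → Bool → Int → Bool
  | [], flag, _ => flag
  | season :: rest, flag, count =>
    let count' := if season != "winter" then count + 1
                  else if season == "winter" then 0 else count
    let flag' := if count' == 5 then true else flag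
    winterLoopA rest flag' count'

def winter_is_coming (seasons : List String) : Bool :=
  winterLoopA seasons false 0

-- ===== PORT B =====
-- groupby(key = s != "winter"): length of the leading non-winter run and the remainder
def nonWinterRun : List String → Nat × List String
  | [] => (0, [])
  | s :: rest =>
    if s == "winter" then (0, s :: rest)
    else
      let (n, r) := nonWinterRun rest
      (n + 1, r)

theorem nonWinterRun_len : ∀ (xs : List String), (nonWinterRun xs).2.length ≤ xs.length
  | [] => Nat.le_refl _
  | s :: rest => by
    simp only [nonWinterRun]
    split
    · simp
    · exact Nat.le_succ_of_le (nonWinterRun_len rest)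

-- any(k and len(run) >= 5 for k, run in groupby(...)): scan the groups
def winterAnyRun : List String → Bool
  | [] => false
  | s :: rest =>
    if s == "winter" then winterAnyRun rest
    else
      (decide ((nonWinterRun rest).1 + 1 ≥ 5)) || winterAnyRun (nonWinterRun rest).2
termination_by xs => xs.length
decreasing_by
  · simp
  · exact Nat.lt_succ_of_le (nonWinterRun_len rest)

def winter_is_coming_alt (seasons : List String) : Bool :=
  winterAnyRun seasons

-- ===== PRECONDITION & SPEC =====
def Spec_winter_is_coming (seasons : List String) (out : Bool) : Prop := out = winter_is_coming_alt seasons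
instance (seasons : List String) (out : Bool) : Decidable (Spec_winter_is_coming seasons out) := by unfold Spec_winter_is_coming; infer_instance

-- ===== CLAIM (what is proved, stated in full; the proofs are below) =====
def Claim_equal_winter_is_coming : Prop := ∀ (seasons : List String), Dom_winter_is_coming seasons → Spec_winter_is_coming seasons (winter_is_coming seasons)

-- ===== LEMMAS AND PROOFS =====

theorem winterLoopA_true : ∀ (xs : List String) (c : Int), winterLoopA xs true c = true
  | [], _ => rfl
  | s :: rest, c => by
    simp only [winterLoopA, ite_self]
    exact winterLoopA_true rest _

theorem winterAnyRun_run (xs : List String) :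
    winterAnyRun xs =
      ((decide ((nonWinterRun xs).1 ≥ 5)) || winterAnyRun (nonWinterRun xs).2) := by
  match xs with
  | [] => simp [winterAnyRun, nonWinterRun]
  | s :: rest =>
    by_cases h : s == "winter"
    · simp [winterAnyRun, nonWinterRun, h]
    · simp [winterAnyRun, nonWinterRun, h]

theorem winterLoopA_char : ∀ (xs : List String) (flag : Bool) (n : Nat), n < 5 →
    winterLoopA xs flag (n : Int) =
      (flag || ((decide (n + (nonWinterRun xs).1 ≥ 5)) || winterAnyRun (nonWinterRun xs).2))
  | [], flag, n, hn => by
    have h5 : ¬ (5 ≤ n + 0) := by omega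
    simp [winterLoopA, nonWinterRun, winterAnyRun]
    exact fun hc => absurd (by omega : 5 ≤ n + 0) h5
  | s :: rest, flag, n, hn => by
    by_cases h : s = "winter"
    · have step : winterLoopA (s :: rest) flag (n : Int) = winterLoopA rest flag ((0 : Nat) : Int) := by
        simp [winterLoopA, h]
      rw [step, winterLoopA_char rest flag 0 (by omega)]
      have hrun : winterAnyRun (s :: rest) = winterAnyRun rest := by
        simp [winterAnyRun, h]
      rw [winterAnyRun_run rest] at hrun
      subst h
      simp [nonWinterRun, hrun, Nat.not_le.mpr hn]
    · have hrun : nonWinterRun (s :: rest) = ((nonWinterRun rest).1 + 1, (nonWinterRun rest).2) := by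
        simp [nonWinterRun, h]
      by_cases h5 : n + 1 = 5
      · have hc5 : ((n : Int) + 1 = 5) := by omega
        have step : winterLoopA (s :: rest) flag (n : Int) = winterLoopA rest true ((n : Int) + 1) := by
          simp [winterLoopA, h, hc5]
        rw [step, winterLoopA_true, hrun]
        simp
        omega
      · have hc5 : ¬ ((n : Int) + 1 = 5) := by omega
        have hcast : ((n : Int) + 1) = ((n + 1 : Nat) : Int) := by push_cast; ring
        have step : winterLoopA (s :: rest) flag (n : Int) = winterLoopA rest flag ((n + 1 : Nat) : Int) := by
          rw [← hcast]
          simp [winterLoopA, h, hc5]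
        rw [step, winterLoopA_char rest flag (n + 1) (by omega), hrun]
        have he : n + 1 + (nonWinterRun rest).1 = n + ((nonWinterRun rest).1 + 1) := by omega
        simp [he]

-- ===== VERDICT (by name: the statement is the Claim_ definition above) =====
theorem winter_is_coming_spec : Claim_equal_winter_is_coming := by
  intro seasons _
  unfold Spec_winter_is_coming winter_is_coming winter_is_coming_alt
  have h := winterLoopA_char seasons false 0 (by omega)
  simp only [Nat.cast_zero] at h
  rw [h, winterAnyRun_run seasons]
  simp
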